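-- pv_equiv track=rewrite | github.com/mazent/SC613 | dbg/utili.py | gomsm
-- ===== SOURCE A (Python) =====
-- def gomsm(conv, div):
--     """
--         Converte un tempo in millisecondi in una stringa
--     """
--     if conv[-1] < div[0]:
--         return conv
--     else:
--         r = conv[-1] % div[0]
--         v = conv[-1] // div[0]
--
--         conv = conv[:len(conv) - 1]
--         conv = conv + (r, v)
--
--         div = div[1:]
--
--         if len(div):
--             return gomsm(conv, div)
--         else:
--             return conv
-- ===== SOURCE B (Python) =====
-- def gomsm(conv, div):
--     """
--         Converte un tempo in millisecondi in una stringa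
--     """
--     for d in div:
--         last = conv[-1]
--         if last < d:
--             return conv
--         conv = conv[:-1] + (last % d, last // d)
--     return conv
-- ===== Notes on version B (the rewrite author's own statement) =====
-- stated objective: simpler
-- what changed: Replaces A's tail recursion (with its trailing len(div) check and re-binding of both arguments) by a plain for-loop over the divisors with an early return, which a reader finds shorter and plainer.
import Mathlib
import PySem

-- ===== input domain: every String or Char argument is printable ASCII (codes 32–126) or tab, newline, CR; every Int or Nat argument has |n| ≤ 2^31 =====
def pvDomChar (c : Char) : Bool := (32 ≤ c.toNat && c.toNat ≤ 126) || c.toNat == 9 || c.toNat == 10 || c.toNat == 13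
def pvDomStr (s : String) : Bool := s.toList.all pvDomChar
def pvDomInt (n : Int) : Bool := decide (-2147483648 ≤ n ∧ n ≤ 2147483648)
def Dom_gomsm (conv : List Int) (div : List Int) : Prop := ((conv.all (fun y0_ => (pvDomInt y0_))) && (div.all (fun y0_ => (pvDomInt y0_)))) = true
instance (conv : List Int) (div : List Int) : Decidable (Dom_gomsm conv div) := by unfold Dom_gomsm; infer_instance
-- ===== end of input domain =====

-- B replaces A's tail recursion by a plain for-loop over the divisors with an early return (objective: simpler).

-- ===== PORT A =====
-- literal transliteration of A: recursion on the divisor list, with the trailing len(div) test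
def gomsm (conv : List Int) (div : List Int) : List Int :=
  match div with
  | [] => conv      -- unreachable under Pre_ (Python raises IndexError at div[0])
  | d :: rest =>
    let last := (PySem.List.pyGet? conv (-1)).getD 0   -- conv[-1]; none (IndexError) excluded by Pre_
    if last < d then conv
    else
      let r := PySem.Int.mod last d
      let v := PySem.Int.floordiv last d
      let conv2 := conv.take (conv.length - 1) ++ [r, v]   -- conv[:len(conv)-1] + (r, v)
      if rest.length ≠ 0 then gomsm conv2 rest else conv2

-- ===== PORT B =====
-- one step of B's for-loop; the Bool flag records that the loop has returned early
def gomsmStep (st : List Int × Bool) (d : Int) : List Int × Bool :=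
  match st with
  | (c, true) => (c, true)
  | (c, false) =>
    let last := (PySem.List.pyGet? c (-1)).getD 0
    if last < d then (c, true)
    else (c.take (c.length - 1) ++ [PySem.Int.mod last d, PySem.Int.floordiv last d], false)

def gomsm_alt (conv : List Int) (div : List Int) : List Int :=
  (div.foldl gomsmStep (conv, false)).1

-- ===== PRECONDITION & SPEC =====
-- the divisors A actually consumes: follow the chain of last-values, stopping at an
-- early return (last < d) or at a zero divisor (where Python raises before recursing)
def gomsmUsedDivs (last : Int) (div : List Int) : List Int :=
  match div with
  | [] => []
  | d :: rest =>
    if last < d then []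
    else d :: (if d = 0 then [] else gomsmUsedDivs (PySem.Int.floordiv last d) rest)

-- Pre_ excludes exactly the inputs on which A raises: empty conv or empty div (IndexError
-- at conv[-1] / div[0]) and inputs whose divisor chain actually reaches a zero divisor
-- (ZeroDivisionError); a 0 in div that the chain never reaches stays inside Pre_.
def Pre_gomsm (conv : List Int) (div : List Int) : Prop :=
  conv ≠ [] ∧ div ≠ [] ∧ (0 : Int) ∉ gomsmUsedDivs ((PySem.List.pyGet? conv (-1)).getD 0) div
instance (conv : List Int) (div : List Int) : Decidable (Pre_gomsm conv div) := by unfold Pre_gomsm; infer_instance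
def pvWitness_gomsm : List Int × List Int := ([123456], [1000, 60, 60])

def Spec_gomsm (conv : List Int) (div : List Int) (out : List Int) : Prop := out = gomsm_alt conv div
instance (conv : List Int) (div : List Int) (out : List Int) : Decidable (Spec_gomsm conv div out) := by unfold Spec_gomsm; infer_instance

-- ===== CLAIM (what is proved, stated in full; the proofs are below) =====
def Claim_equal_gomsm : Prop := ∀ (conv : List Int) (div : List Int), Dom_gomsm conv div → Pre_gomsm conv div → Spec_gomsm conv div (gomsm conv div)

-- ===== LEMMAS AND PROOFS =====

-- once B's loop has returned early, the remaining iterations change nothing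
theorem gomsmStep_done (c : List Int) (l : List Int) :
    l.foldl gomsmStep (c, true) = (c, true) := by
  induction l with
  | nil => rfl
  | cons d rest ih => simpa [gomsmStep] using ih

theorem gomsm_eq_alt (div : List Int) (conv : List Int) (h : div ≠ []) :
    gomsm conv div = gomsm_alt conv div := by
  induction div generalizing conv with
  | nil => exact absurd rfl h
  | cons d rest ih =>
    by_cases hlt : (PySem.List.pyGet? conv (-1)).getD 0 < d
    · simp [gomsm, gomsm_alt, gomsmStep, hlt, gomsmStep_done]
    · match rest, ih with
      | [], _ => simp [gomsm, gomsm_alt, gomsmStep, hlt]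
      | r :: rs, ih =>
        have := ih (conv.take (conv.length - 1) ++
          [PySem.Int.mod ((PySem.List.pyGet? conv (-1)).getD 0) d,
           PySem.Int.floordiv ((PySem.List.pyGet? conv (-1)).getD 0) d]) (by simp)
        simpa [gomsm, gomsm_alt, gomsmStep, hlt] using this

-- ===== VERDICT (by name: the statement is the Claim_ definition above) =====
theorem gomsm_spec : Claim_equal_gomsm := by
  intro conv div _ hpre
  exact gomsm_eq_alt div conv hpre.2.1
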